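-- pv_equiv track=rewrite | github.com/The-Kara-System/tks-essentials | tests/conftest.py | _integration_tests_requested
-- ===== SOURCE A (Python) =====
-- def _integration_tests_requested(args: list[str]) -> bool:
--     for arg in args:
--         normalized = str(arg).replace("\\", "/").rstrip("/")
--         if (
--             normalized == "tests/int"
--             or normalized.startswith("tests/int/")
--             or normalized.endswith("/tests/int")
--             or "/tests/int/" in normalized
--         ):
--             return True
--     return False
-- ===== SOURCE B (Python) =====
-- def _integration_tests_requested(args: list[str]) -> bool:
--     for arg in args:
--         normalized = str(arg).replace("\\", "/").rstrip("/")
--         segments = normalized.split("/")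
--         if any(a == "tests" and b == "int" for a, b in zip(segments, segments[1:])):
--             return True
--     return False
-- ===== Notes on version B (the rewrite author's own statement) =====
-- stated objective: simpler
-- what changed: Replaces A's four boundary string-predicates (equality, startswith, endswith, substring) by splitting the normalized path on the separator and scanning once for the adjacent tests-then-int segment pair.
import Mathlib
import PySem

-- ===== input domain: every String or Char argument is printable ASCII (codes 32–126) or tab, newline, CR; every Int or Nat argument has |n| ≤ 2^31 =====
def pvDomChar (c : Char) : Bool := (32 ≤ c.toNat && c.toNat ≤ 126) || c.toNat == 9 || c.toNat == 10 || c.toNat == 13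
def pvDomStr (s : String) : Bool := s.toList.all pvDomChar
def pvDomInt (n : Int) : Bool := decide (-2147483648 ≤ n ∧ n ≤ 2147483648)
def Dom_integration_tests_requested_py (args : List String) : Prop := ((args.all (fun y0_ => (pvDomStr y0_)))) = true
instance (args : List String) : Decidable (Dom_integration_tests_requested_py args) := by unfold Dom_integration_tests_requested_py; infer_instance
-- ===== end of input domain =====

-- B replaces A's four boundary string-predicates by a split-into-segments scan for an
-- adjacent ("tests","int") pair: simpler decomposition, same cost; return values agree on all inputs.

-- shared normalization, identical in both Pythons: str(arg).replace("\\", "/").rstrip("/")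
-- .rstrip("/") is ported by hand (PySem has no rstrip-with-chars): drop trailing '/' chars — exact.
def pvNormalize (s : String) : String :=
  String.ofList (((PySem.Str.replace s "\\" "/").toList.reverse.dropWhile (fun c => c == '/')).reverse)

-- ===== PORT A =====
def integration_tests_requested_py : List String → Bool
  | [] => false
  | arg :: rest =>
    let normalized := pvNormalize arg
    if normalized == "tests/int"
        || PySem.Str.startswith normalized "tests/int/"
        || PySem.Str.endswith normalized "/tests/int"
        || PySem.Str.isIn "/tests/int/" normalized
    then true
    else integration_tests_requested_py rest

-- ===== PORT B =====
def integration_tests_requested_py_alt : List String → Bool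
  | [] => false
  | arg :: rest =>
    -- normalized.split("/"): the separator "/" is non-empty, so split? always returns some
    let segments := (PySem.Str.split? (pvNormalize arg) "/").getD []
    -- any(a == "tests" and b == "int" for a, b in zip(segments, segments[1:]))
    ((segments.zip (PySem.List.slice segments (some 1) none)).any
        (fun p => p.1 == "tests" && p.2 == "int"))
      || integration_tests_requested_py_alt rest

-- ===== PRECONDITION & SPEC =====
def Spec_integration_tests_requested_py (args : List String) (out : Bool) : Prop := out = integration_tests_requested_py_alt args
instance (args : List String) (out : Bool) : Decidable (Spec_integration_tests_requested_py args out) := by unfold Spec_integration_tests_requested_py; infer_instance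

-- ===== CLAIM (what is proved, stated in full; the proofs are below) =====
def Claim_equal_integration_tests_requested_py : Prop := ∀ (args : List String), Dom_integration_tests_requested_py args → Spec_integration_tests_requested_py args (integration_tests_requested_py args)

-- ===== LEMMAS AND PROOFS =====

-- PySem.Chars.splitOn with a single-character separator is List.splitOn
lemma pv_splitOn_go_eq (c : Char) (fuel : Nat) (l cur : List Char) (acc' : List (List Char))
    (h : l.length ≤ fuel) :
    PySem.Chars.splitOn.go [c] fuel l cur acc' =
      acc'.reverse ++ List.modifyHead (cur.reverse ++ ·) (List.splitOn c l) := by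
  induction fuel generalizing l cur acc' with
  | zero =>
    have : l = [] := List.eq_nil_of_length_eq_zero (Nat.le_zero.mp h)
    subst this
    simp [PySem.Chars.splitOn.go, List.splitOn, List.splitOnP_nil]
  | succ fuel ih =>
    cases l with
    | nil => simp [PySem.Chars.splitOn.go, List.splitOn, List.splitOnP_nil]
    | cons c' rest =>
      obtain ⟨hd, tl, he⟩ := List.exists_cons_of_ne_nil (List.splitOnP_ne_nil (· == c) rest)
      by_cases hc : c' = c
      · subst hc
        rw [PySem.Chars.splitOn.go]
        rw [if_pos (by simp [List.isPrefixOf])]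
        rw [ih _ _ _ (by simpa using Nat.le_of_succ_le_succ h)]
        simp [List.splitOn, List.splitOnP_cons, he]
      · rw [PySem.Chars.splitOn.go]
        rw [if_neg (by simp [List.isPrefixOf, Ne.symm hc])]
        rw [ih _ _ _ (by simpa using Nat.le_of_succ_le_succ h)]
        simp [List.splitOn, List.splitOnP_cons, hc, he]

lemma pv_chars_splitOn_eq (c : Char) (s : List Char) :
    PySem.Chars.splitOn s [c] = List.splitOn c s := by
  rw [PySem.Chars.splitOn, pv_splitOn_go_eq c _ _ _ _ (Nat.le_succ _)]
  obtain ⟨hd, tl, he⟩ := List.exists_cons_of_ne_nil (List.splitOnP_ne_nil (· == c) s)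
  simp [List.splitOn, he]

-- splitting at an explicit separator occurrence splits the two sides independently
lemma pv_splitOn_append_cons (c : Char) (u w : List Char) :
    List.splitOn c (u ++ c :: w) = List.splitOn c u ++ List.splitOn c w := by
  induction u with
  | nil => simp [List.splitOn, List.splitOnP_cons, List.splitOnP_nil]
  | cons a u ih =>
    by_cases ha : a = c
    · subst ha
      simp only [List.cons_append, List.splitOn, List.splitOnP_cons, beq_self_eq_true]
      simpa [List.splitOn] using congrArg (List.cons []) ih
    · obtain ⟨hd, tl, he⟩ := List.exists_cons_of_ne_nil (List.splitOnP_ne_nil (· == c) (u ++ c :: w))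
      obtain ⟨hd2, tl2, he2⟩ := List.exists_cons_of_ne_nil (List.splitOnP_ne_nil (· == c) u)
      have ih' := ih
      simp only [List.splitOn] at ih' ⊢
      rw [List.cons_append, List.splitOnP_cons, List.splitOnP_cons]
      simp only [ha, beq_iff_eq, he, he2] at ih' ⊢
      cases ih'
      simp

lemma pv_intercalate_cons (c : Char) (a : List Char) (t : List (List Char)) (h : t ≠ []) :
    [c].intercalate (a :: t) = a ++ c :: [c].intercalate t := by
  obtain ⟨b, t, rfl⟩ := List.exists_cons_of_ne_nil h
  simp [List.intercalate]

lemma pv_intercalate_append (c : Char) (l X : List (List Char)) (hl : l ≠ []) (hX : X ≠ []) :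
    [c].intercalate (l ++ X) = [c].intercalate l ++ c :: [c].intercalate X := by
  induction l with
  | nil => exact absurd rfl hl
  | cons a l ih =>
    cases l with
    | nil =>
      rw [List.singleton_append, pv_intercalate_cons c a X hX]
      simp [List.intercalate]
    | cons b l' =>
      rw [List.cons_append, pv_intercalate_cons c a _ (by simp),
        pv_intercalate_cons c a _ (by simp), ih (by simp)]
      simp

-- the adjacent-pair scan of B finds exactly a decomposition l ++ [A, B] ++ r
lemma pv_any_adj {α : Type} [BEq α] [LawfulBEq α] (A B : α) (xs : List α) :
    ((xs.zip xs.tail).any (fun p => p.1 == A && p.2 == B)) = true ↔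
      ∃ l r, xs = l ++ A :: B :: r := by
  induction xs with
  | nil => simp
  | cons a t ih =>
    cases t with
    | nil =>
      simp only [List.tail_cons, List.zip_nil_right, List.any_nil]
      constructor
      · intro h
        simp at h
      · rintro ⟨l, r, hl⟩
        rcases l with _ | ⟨x, l⟩ <;> simp_all
    | cons b t' =>
      rw [show (b :: t').tail = t' from rfl] at ih
      simp only [List.tail_cons, List.zip_cons_cons, List.any_cons, Bool.or_eq_true,
        Bool.and_eq_true, beq_iff_eq]
      rw [ih]
      constructor
      · rintro (⟨rfl, rfl⟩ | ⟨l, r, hl⟩)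
        · exact ⟨[], t', rfl⟩
        · exact ⟨a :: l, r, by simp [hl]⟩
      · rintro ⟨l, r, hl⟩
        rcases l with _ | ⟨x, l⟩
        · simp only [List.nil_append, List.cons.injEq] at hl
          exact Or.inl ⟨hl.1, hl.2.1⟩
        · simp only [List.cons_append, List.cons.injEq] at hl
          exact Or.inr ⟨l, r, hl.2⟩

-- core: A's four-predicate test on a character list ⟺ its splitOn has an adjacent ("tests","int") pair
lemma pv_key (n : List Char) :
    (n = "tests/int".toList ∨ "tests/int/".toList <+: n ∨ "/tests/int".toList <:+ n ∨
      "/tests/int/".toList <:+: n)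
    ↔ ∃ l r, List.splitOn '/' n = l ++ "tests".toList :: "int".toList :: r := by
  constructor
  · rintro (rfl | ⟨t, rfl⟩ | ⟨t, rfl⟩ | ⟨u, v, rfl⟩)
    · exact ⟨[], [], by decide⟩
    · refine ⟨[], List.splitOn '/' t, ?_⟩
      rw [show "tests/int/".toList ++ t = "tests/int".toList ++ '/' :: t from rfl,
        pv_splitOn_append_cons,
        show List.splitOn '/' "tests/int".toList = ["tests".toList, "int".toList] from by decide]
      rfl
    · refine ⟨List.splitOn '/' t, [], ?_⟩
      rw [show t ++ "/tests/int".toList = t ++ '/' :: "tests/int".toList from rfl,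
        pv_splitOn_append_cons,
        show List.splitOn '/' "tests/int".toList = ["tests".toList, "int".toList] from by decide]
    · refine ⟨List.splitOn '/' u, List.splitOn '/' v, ?_⟩
      rw [show u ++ "/tests/int/".toList ++ v
            = u ++ '/' :: ("tests/int".toList ++ '/' :: v) from by simp,
        pv_splitOn_append_cons, pv_splitOn_append_cons,
        show List.splitOn '/' "tests/int".toList = ["tests".toList, "int".toList] from by decide]
      rfl
  · rintro ⟨l, r, hs⟩
    have hn : n = ['/'].intercalate (l ++ "tests".toList :: "int".toList :: r) := by
      rw [← hs, List.intercalate_splitOn]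
    rcases l with _ | ⟨a, l⟩
    · rcases r with _ | ⟨b, r⟩
      · left
        rw [hn]
        rfl
      · right; left
        rw [hn, List.nil_append,
          pv_intercalate_cons '/' "tests".toList _ (by simp),
          pv_intercalate_cons '/' "int".toList _ (by simp)]
        exact ⟨['/'].intercalate (b :: r), rfl⟩
    · rcases r with _ | ⟨b, r⟩
      · right; right; left
        rw [hn, pv_intercalate_append '/' (a :: l) _ (by simp) (by simp)]
        exact ⟨['/'].intercalate (a :: l), rfl⟩
      · right; right; right
        rw [hn,
          show (a :: l) ++ "tests".toList :: "int".toList :: b :: r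
              = (a :: l) ++ ("tests".toList :: "int".toList :: b :: r) from rfl,
          pv_intercalate_append '/' (a :: l) _ (by simp) (by simp),
          pv_intercalate_cons '/' "tests".toList ("int".toList :: b :: r) (by simp),
          pv_intercalate_cons '/' "int".toList (b :: r) (by simp)]
        refine ⟨['/'].intercalate (a :: l), ['/'].intercalate (b :: r), ?_⟩
        rw [List.append_assoc]
        rfl

-- a decomposition of a list of strings ⟺ the same decomposition of its char lists
lemma pv_exists_map (xs : List String) :
    (∃ l r, xs = l ++ "tests" :: "int" :: r) ↔
      ∃ l r, xs.map String.toList = l ++ "tests".toList :: "int".toList :: r := by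
  constructor
  · rintro ⟨l, r, rfl⟩
    exact ⟨l.map String.toList, r.map String.toList, by simp⟩
  · rintro ⟨l, r, h⟩
    rw [List.map_eq_append_iff] at h
    obtain ⟨l₁, l₂, rfl, _, hl₂⟩ := h
    rw [List.map_eq_cons_iff] at hl₂
    obtain ⟨a, t, rfl, ha, ht⟩ := hl₂
    rw [List.map_eq_cons_iff] at ht
    obtain ⟨b, t', rfl, hb, _⟩ := ht
    obtain rfl : a = "tests" := String.toList_inj.mp ha
    obtain rfl : b = "int" := String.toList_inj.mp hb
    exact ⟨l₁, t', rfl⟩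

lemma pv_bool_ext {a b : Bool} (h : (a = true) ↔ (b = true)) : a = b := by
  cases a <;> cases b <;> simp_all

-- per-argument agreement of the two loop bodies
set_option maxHeartbeats 400000 in
lemma pv_body (s : String) :
    (pvNormalize s == "tests/int"
        || PySem.Str.startswith (pvNormalize s) "tests/int/"
        || PySem.Str.endswith (pvNormalize s) "/tests/int"
        || PySem.Str.isIn "/tests/int/" (pvNormalize s)) =
      ((((PySem.Str.split? (pvNormalize s) "/").getD []).zip
          (PySem.List.slice ((PySem.Str.split? (pvNormalize s) "/").getD []) (some 1) none)).any
        (fun p => p.1 == "tests" && p.2 == "int")) := by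
  have hsplit : ∃ ss, PySem.Str.split? (pvNormalize s) "/" = some ss ∧
      ss.map String.toList = List.splitOn '/' (pvNormalize s).toList := by
    have h := PySem.Str.split?_map (pvNormalize s) "/"
    rw [show ("/" : String).toList = ['/'] from rfl,
      show PySem.Chars.split? (pvNormalize s).toList ['/']
          = some (PySem.Chars.splitOn (pvNormalize s).toList ['/']) from by
        simp [PySem.Chars.split?]] at h
    cases hq : PySem.Str.split? (pvNormalize s) "/" with
    | none => rw [hq] at h; simp at h
    | some ss =>
      rw [hq] at h
      simp only [Option.map_some, Option.some.injEq] at h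
      exact ⟨ss, rfl, by rw [h, pv_chars_splitOn_eq]⟩
  obtain ⟨ss, hss, hmap⟩ := hsplit
  have hslice : PySem.List.slice ss (some 1) none = ss.tail := by
    rw [PySem.List.slice_from ss (by norm_num)]
    simp
  apply pv_bool_ext
  rw [hss]
  simp only [Option.getD_some, hslice]
  rw [pv_any_adj "tests" "int" ss, pv_exists_map, hmap, ← pv_key]
  have h1 : ((pvNormalize s == "tests/int") = true) ↔
      (pvNormalize s).toList = "tests/int".toList :=
    beq_iff_eq.trans String.toList_inj.symm
  have h2 : (PySem.Str.startswith (pvNormalize s) "tests/int/" = true) ↔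
      "tests/int/".toList <+: (pvNormalize s).toList := by
    rw [PySem.Str.startswith_eq]
    exact PySem.Chars.startswith_iff _ _
  have h3 : (PySem.Str.endswith (pvNormalize s) "/tests/int" = true) ↔
      "/tests/int".toList <:+ (pvNormalize s).toList := by
    rw [PySem.Str.endswith_eq]
    exact PySem.Chars.endswith_iff _ _
  have h4 := PySem.Str.isIn_iff_infix "/tests/int/" (pvNormalize s)
  simp only [Bool.or_eq_true, h1, h2, h3, h4, or_assoc]

-- the two loops agree argument by argument
lemma pv_loop (args : List String) :
    integration_tests_requested_py args = integration_tests_requested_py_alt args := by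
  induction args with
  | nil => rfl
  | cons arg rest ih =>
    simp only [integration_tests_requested_py, integration_tests_requested_py_alt]
    rw [← pv_body arg, ih]
    cases (pvNormalize arg == "tests/int"
        || PySem.Str.startswith (pvNormalize arg) "tests/int/"
        || PySem.Str.endswith (pvNormalize arg) "/tests/int"
        || PySem.Str.isIn "/tests/int/" (pvNormalize arg)) <;> simp

-- ===== VERDICT (by name: the statement is the Claim_ definition above) =====
theorem integration_tests_requested_py_spec : Claim_equal_integration_tests_requested_py := by
  intro args _
  exact pv_loop args
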